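-- pv_equiv track=rewrite | github.com/compellit/gama-sym | src/scansion/eval/eval_line_types.py | number_of_syllables_after_last_stress_match
-- ===== SOURCE A (Python) =====
-- def number_of_syllables_after_last_stress_match(gold: str, pred: str) -> tuple[bool, int]:
--     """
--     Check if the number of syllables after the last stressed syllable in the predicted and gold strings match.
--
--     Args:
--         gold (str): Gold standard syllabification with stress marks.
--         pred (str): Predicted syllabification with stress marks.
--     Returns:
--         tuple[bool, int]: Whether the number matches across gold and predicted, number of sylables predicted after last stress
--
--     """
--     pred_sylls = pred.split(" / ")
--     gold_sylls = gold.split(" / ")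
--     pred_stress = [i + 1 for i, s in enumerate(pred_sylls) if "*" in s]
--     gold_stress = [i + 1 for i, s in enumerate(gold_sylls) if "*" in s]
--     if not pred_stress or not gold_stress:
--         return False, -1
--     pred_nbr_after_last_stress = len(pred_sylls) - pred_stress[-1]
--     gold_nbr_after_last_stress = len(gold_sylls) - gold_stress[-1]
--     return (pred_nbr_after_last_stress == gold_nbr_after_last_stress, pred_nbr_after_last_stress)
-- ===== SOURCE B (Python) =====
-- def number_of_syllables_after_last_stress_match(gold: str, pred: str) -> tuple[bool, int]:
--     def trailing(s: str):
--         # count trailing syllables without '*', scanning from the end; None if no stress at all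
--         count = 0
--         for syll in reversed(s.split(" / ")):
--             if "*" in syll:
--                 return count
--             count += 1
--         return None
--     p = trailing(pred)
--     g = trailing(gold)
--     if p is None or g is None:
--         return False, -1
--     return p == g, p
-- ===== Notes on version B (the rewrite author's own statement) =====
-- stated objective: alternative
-- what changed: Instead of building the full lists of 1-based stress indices and subtracting the last one from the length, B scans each split list from the end with an early-stopping counter of unstarred trailing syllables (None when no syllable is starred).
import Mathlib
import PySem

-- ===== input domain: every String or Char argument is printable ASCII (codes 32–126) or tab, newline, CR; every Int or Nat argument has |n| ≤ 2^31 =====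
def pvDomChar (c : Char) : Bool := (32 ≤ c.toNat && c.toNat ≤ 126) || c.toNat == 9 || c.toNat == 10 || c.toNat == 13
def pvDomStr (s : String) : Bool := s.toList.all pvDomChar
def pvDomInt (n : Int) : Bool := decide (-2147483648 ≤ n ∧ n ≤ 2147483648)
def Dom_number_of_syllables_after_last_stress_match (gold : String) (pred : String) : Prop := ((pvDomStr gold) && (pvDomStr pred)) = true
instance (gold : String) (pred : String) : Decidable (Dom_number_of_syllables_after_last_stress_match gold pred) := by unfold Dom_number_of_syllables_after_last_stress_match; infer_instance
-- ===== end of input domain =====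

-- B scans each split list from the end with an early-stopping counter instead of building the
-- full lists of 1-based stress indices (alternative decomposition; same asymptotic cost).

-- ===== PORT A =====
def number_of_syllables_after_last_stress_match (gold : String) (pred : String) : Bool × Int :=
  let pred_sylls := (PySem.Str.split? pred " / ").getD []
  let gold_sylls := (PySem.Str.split? gold " / ").getD []
  let pred_stress := (PySem.List.enumerate pred_sylls).filterMap
    (fun p => if PySem.Str.isIn "*" p.2 then some (p.1 + 1) else none)
  let gold_stress := (PySem.List.enumerate gold_sylls).filterMap
    (fun p => if PySem.Str.isIn "*" p.2 then some (p.1 + 1) else none)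
  if pred_stress.isEmpty || gold_stress.isEmpty then (false, -1)
  else
    let pred_nbr : Int := (pred_sylls.length : Int) - pred_stress.getLast!
    let gold_nbr : Int := (gold_sylls.length : Int) - gold_stress.getLast!
    (pred_nbr == gold_nbr, pred_nbr)

-- ===== PORT B =====
-- trailing counter: syllables (given back-to-front) before the first starred one; none = no stress
def pvTrailing : List String → Int → Option Int
  | [], _ => none
  | s :: rest, count => if PySem.Str.isIn "*" s then some count else pvTrailing rest (count + 1)

def number_of_syllables_after_last_stress_match_alt (gold : String) (pred : String) : Bool × Int :=
  let p := pvTrailing ((PySem.Str.split? pred " / ").getD []).reverse 0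
  let g := pvTrailing ((PySem.Str.split? gold " / ").getD []).reverse 0
  match p, g with
  | some p, some g => (p == g, p)
  | _, _ => (false, -1)

-- ===== PRECONDITION & SPEC =====
def Spec_number_of_syllables_after_last_stress_match (gold : String) (pred : String) (out : Bool × Int) : Prop := out = number_of_syllables_after_last_stress_match_alt gold pred
instance (gold : String) (pred : String) (out : Bool × Int) : Decidable (Spec_number_of_syllables_after_last_stress_match gold pred out) := by unfold Spec_number_of_syllables_after_last_stress_match; infer_instance

-- ===== CLAIM (what is proved, stated in full; the proofs are below) =====
def Claim_equal_number_of_syllables_after_last_stress_match : Prop := ∀ (gold : String) (pred : String), Dom_number_of_syllables_after_last_stress_match gold pred → Spec_number_of_syllables_after_last_stress_match gold pred (number_of_syllables_after_last_stress_match gold pred)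

-- ===== LEMMAS AND PROOFS =====

-- A's stress-index list for a syllable list
def pvStress (L : List String) : List Int :=
  (PySem.List.enumerate L).filterMap
    (fun p => if PySem.Str.isIn "*" p.2 then some (p.1 + 1) else none)

theorem pvStress_concat (L : List String) (x : String) :
    pvStress (L ++ [x]) =
      pvStress L ++ (if PySem.Str.isIn "*" x then [((L.length : Int) + 1)] else []) := by
  unfold pvStress
  rw [PySem.List.enumerate_append, List.filterMap_append]
  simp [PySem.List.enumerate_cons, PySem.List.enumerate_nil]
  split_ifs <;> simp_all

-- the core invariant: the reverse early-stopping counter equals length − last stress index (+ acc)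
theorem pvTrailing_eq (M : List String) (c : Int) :
    pvTrailing M c =
      (pvStress M.reverse).getLast?.map (fun k => (M.length : Int) - k + c) := by
  induction M generalizing c with
  | nil => simp [pvTrailing, pvStress, PySem.List.enumerate_nil]
  | cons x M' ih =>
    show (if PySem.Str.isIn "*" x then some c else pvTrailing M' (c + 1)) = _
    rw [List.reverse_cons, pvStress_concat]
    by_cases hx : PySem.Chars.isIn ['*'] x.toList = true
    · simp [PySem.Str.isIn, hx]
    · simp [PySem.Str.isIn, hx, ih (c + 1)]
      cases h : (pvStress M'.reverse).getLast? with
      | none => simp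
      | some k =>
        simp
        ring

theorem pvTrailing_reverse (L : List String) :
    pvTrailing L.reverse 0 =
      (pvStress L).getLast?.map (fun k => (L.length : Int) - k) := by
  have := pvTrailing_eq L.reverse 0
  simpa using this

-- the two bodies agree for arbitrary split lists
theorem pvKey (P G : List String) :
    (if (pvStress P).isEmpty || (pvStress G).isEmpty then ((false : Bool), (-1 : Int))
     else ((((P.length : Int) - (pvStress P).getLast!) == ((G.length : Int) - (pvStress G).getLast!)),
           (P.length : Int) - (pvStress P).getLast!))
    = (match pvTrailing P.reverse 0, pvTrailing G.reverse 0 with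
       | some p, some g => ((p == g), p)
       | _, _ => ((false : Bool), (-1 : Int))) := by
  rw [pvTrailing_reverse, pvTrailing_reverse]
  cases hp : (pvStress P).getLast? with
  | none =>
    have h0 : pvStress P = [] := List.getLast?_eq_none_iff.mp hp
    simp [h0]
  | some kp =>
    have hPne : (pvStress P).isEmpty = false := by
      cases hL : pvStress P with
      | nil => rw [hL] at hp; simp at hp
      | cons a l => simp
    cases hg : (pvStress G).getLast? with
    | none =>
      have h0 : pvStress G = [] := List.getLast?_eq_none_iff.mp hg
      simp [h0, hPne]
    | some kg =>
      have hGne : (pvStress G).isEmpty = false := by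
        cases hL : pvStress G with
        | nil => rw [hL] at hg; simp at hg
        | cons a l => simp
      simp [hPne, hGne, hp, hg]

-- ===== VERDICT (by name: the statement is the Claim_ definition above) =====
theorem number_of_syllables_after_last_stress_match_spec : Claim_equal_number_of_syllables_after_last_stress_match := by
  intro gold pred _h
  unfold Spec_number_of_syllables_after_last_stress_match
  show number_of_syllables_after_last_stress_match gold pred
     = number_of_syllables_after_last_stress_match_alt gold pred
  unfold number_of_syllables_after_last_stress_match number_of_syllables_after_last_stress_match_alt
  exact pvKey ((PySem.Str.split? pred " / ").getD []) ((PySem.Str.split? gold " / ").getD [])
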